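-- pv_equiv track=rewrite | github.com/eonignis/ejercicios_clase | Programación - Python/UF2/Practica 2/2_ex5.py | aprovats_mes50
-- ===== SOURCE A (Python) =====
-- def aprovats_mes50(l):
-- 	apro=0
-- 	sus=0
-- 	for i in(l):
-- 		if i>=5:
-- 			apro+=1
-- 		else:
-- 			sus+=1
-- 	if apro>=sus:
-- 		return True
-- 	else:
-- 		return False
-- ===== SOURCE B (Python) =====
-- def aprovats_mes50(l):
--     if not l:
--         return True
--     return sorted(l)[len(l) // 2] >= 5
-- ===== Notes on version B (the rewrite author's own statement) =====
-- stated objective: alternative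
-- what changed: Instead of scanning and counting passing vs failing grades, B sorts the list and tests the single element at index len(l)//2: failing grades occupy a prefix of the sorted list, so at least half pass iff that median-position element is >= 5 (empty list gives True, as in A).
import Mathlib
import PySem

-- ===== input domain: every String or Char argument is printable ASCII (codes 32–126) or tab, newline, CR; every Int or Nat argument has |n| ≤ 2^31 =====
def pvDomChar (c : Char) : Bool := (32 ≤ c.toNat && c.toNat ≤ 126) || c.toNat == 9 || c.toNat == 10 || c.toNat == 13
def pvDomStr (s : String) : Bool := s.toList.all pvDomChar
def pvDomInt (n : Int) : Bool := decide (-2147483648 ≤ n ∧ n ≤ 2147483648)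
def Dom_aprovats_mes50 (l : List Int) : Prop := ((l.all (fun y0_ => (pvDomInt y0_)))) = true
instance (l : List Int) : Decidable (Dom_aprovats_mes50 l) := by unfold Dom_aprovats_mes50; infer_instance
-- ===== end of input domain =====

-- B replaces the two-counter scan by sorting the list and testing the element at index len(l)//2
-- (failing grades form a prefix of the sorted list); alternative algorithm, same return value.

-- ===== PORT A =====
def aprovats_mes50 (l : List Int) : Bool :=
  let st := l.foldl (fun (st : Int × Int) i =>
    if i ≥ 5 then (st.1 + 1, st.2) else (st.1, st.2 + 1)) (0, 0)
  if st.1 ≥ st.2 then true else false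

-- ===== PORT B =====
def aprovats_mes50_alt (l : List Int) : Bool :=
  if l = [] then true
  else
    match PySem.List.pyGet? (PySem.List.sorted l (fun x => x) false)
        (PySem.Int.floordiv (l.length : Int) 2) with
    | some m => decide (m ≥ 5)
    | none => false  -- unreachable: 0 ≤ len//2 < len for a nonempty list, so Python never raises here

-- ===== PRECONDITION & SPEC =====
def Spec_aprovats_mes50 (l : List Int) (out : Bool) : Prop := out = aprovats_mes50_alt l
instance (l : List Int) (out : Bool) : Decidable (Spec_aprovats_mes50 l out) := by unfold Spec_aprovats_mes50; infer_instance

-- ===== CLAIM (what is proved, stated in full; the proofs are below) =====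
def Claim_equal_aprovats_mes50 : Prop := ∀ (l : List Int), Dom_aprovats_mes50 l → Spec_aprovats_mes50 l (aprovats_mes50 l)

-- ===== LEMMAS AND PROOFS =====

-- A's fold from accumulator (a, s): final apro = a + #pass, final sus = s + #fail
theorem pvA_fold (l : List Int) (a s : Int) :
    l.foldl (fun (st : Int × Int) i =>
      if i ≥ 5 then (st.1 + 1, st.2) else (st.1, st.2 + 1)) (a, s)
    = (a + (l.countP (fun g => decide (5 ≤ g)) : Int),
       s + (l.countP (fun g => decide (g < 5)) : Int)) := by
  induction l generalizing a s with
  | nil => simp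
  | cons x xs ih =>
    by_cases h : x ≥ 5
    · have h' : ¬ x < 5 := by omega
      simp [List.foldl_cons, h, h', ih]
      ring
    · have h' : x < 5 := by omega
      simp [List.foldl_cons, h, h', ih]
      ring

-- in a ≤-sorted list the failing grades form a prefix: s[k] ≥ 5 ↔ (#fails) ≤ k
theorem pv_sorted_get (s : List Int) (hs : s.Pairwise (fun a b => a ≤ b)) :
    ∀ (k : Nat) (h : k < s.length),
      (5 ≤ s[k] ↔ s.countP (fun g => decide (g < 5)) ≤ k) := by
  induction s with
  | nil => intro k h; simp at h
  | cons x t ih =>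
    rcases List.pairwise_cons.mp hs with ⟨hx, ht⟩
    intro k h
    by_cases hx5 : x < 5
    · cases k with
      | zero => simp [hx5]
      | succ k =>
        have hk : k < t.length := by simpa using h
        have hIH := ih ht k hk
        simp only [List.getElem_cons_succ, List.countP_cons, hx5, decide_true, if_true]
        constructor
        · intro h5; have := hIH.mp h5; omega
        · intro hle; exact hIH.mpr (by omega)
    · have hz : t.countP (fun g => decide (g < 5)) = 0 := by
        rw [List.countP_eq_zero]
        intro g hg
        have := hx g hg
        simp; omega
      cases k with
      | zero => simp [hx5, hz]; omega
      | succ k =>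
        have hk : k < t.length := by simpa using h
        have h5 : 5 ≤ t[k] := by
          have := hx t[k] (List.getElem_mem hk)
          omega
        simp [hx5, hz, h5]

-- passing and failing counts partition the list
theorem pv_count_split (l : List Int) :
    l.countP (fun g => decide (5 ≤ g)) + l.countP (fun g => decide (g < 5)) = l.length := by
  induction l with
  | nil => simp
  | cons x t ih =>
    simp only [List.countP_cons, List.length_cons]
    split_ifs <;> simp_all <;> omega

-- ===== VERDICT (by name: the statement is the Claim_ definition above) =====
theorem aprovats_mes50_spec : Claim_equal_aprovats_mes50 := by
  intro l _
  unfold Spec_aprovats_mes50 aprovats_mes50 aprovats_mes50_alt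
  simp only [pvA_fold, zero_add]
  by_cases hnil : l = []
  · subst hnil; simp
  · rw [if_neg hnil]
    -- the index len(l)//2 as a Nat
    have hn : 1 ≤ l.length := List.length_pos_iff.mpr hnil
    have hidx : PySem.Int.floordiv (l.length : Int) 2 = ((l.length / 2 : Nat) : Int) := by
      exact_mod_cast PySem.Int.floordiv_natCast l.length 2
    set s := PySem.List.sorted l (fun x => x) false with hsdef
    have hlen : s.length = l.length := PySem.List.length_sorted l _ _
    have hklt : l.length / 2 < s.length := by omega
    rw [hidx, PySem.List.pyGet?_natCast, List.getElem?_eq_getElem hklt]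
    have hpair : s.Pairwise (fun a b => a ≤ b) := PySem.List.sorted_pairwise l (fun x => x)
    have hcnt : s.countP (fun g => decide (g < 5)) = l.countP (fun g => decide (g < 5)) :=
      (PySem.List.sorted_perm l (fun x => x) false).countP_eq _
    have hsum := pv_count_split l
    have hmid := pv_sorted_get s hpair (l.length / 2) hklt
    by_cases hc : (l.countP (fun g => decide (5 ≤ g)) : Int) ≥ (l.countP (fun g => decide (g < 5)) : Int)
    · rw [if_pos hc]
      have : 5 ≤ s[l.length / 2] := hmid.mpr (by omega)
      simp [this]
    · rw [if_neg hc]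
      have : ¬ (5 ≤ s[l.length / 2]) := fun h5 => hc (by have := hmid.mp h5; omega)
      simpa using this
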